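-- pv_equiv track=rewrite | github.com/camilo-v/flint | index_preprocessing/3-annotations/ensembl_postprocessing_python/add_strain_column.py | remove_word_species
-- ===== SOURCE A (Python) =====
-- def remove_word_species(word):
--     if word!="unclassified":
--         alist=word.split(" ")[1:]
--         new_word=""
--         for item in alist:
--             new_word+=item+" "
--         word=new_word.strip(" ")
--     return word
-- ===== SOURCE B (Python) =====
-- def remove_word_species(word):
--     if word != "unclassified":
--         # everything after the first space ('' if none), then strip spaces
--         word = word.partition(" ")[2].strip(" ")
--     return word
-- ===== Notes on version B (the rewrite author's own statement) =====
-- stated objective: simpler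
-- what changed: Replaces the split-into-words / accumulate-each-word-plus-space loop / strip pipeline by a single first-delimiter partition: everything after the first space, stripped of spaces.
import Mathlib
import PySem

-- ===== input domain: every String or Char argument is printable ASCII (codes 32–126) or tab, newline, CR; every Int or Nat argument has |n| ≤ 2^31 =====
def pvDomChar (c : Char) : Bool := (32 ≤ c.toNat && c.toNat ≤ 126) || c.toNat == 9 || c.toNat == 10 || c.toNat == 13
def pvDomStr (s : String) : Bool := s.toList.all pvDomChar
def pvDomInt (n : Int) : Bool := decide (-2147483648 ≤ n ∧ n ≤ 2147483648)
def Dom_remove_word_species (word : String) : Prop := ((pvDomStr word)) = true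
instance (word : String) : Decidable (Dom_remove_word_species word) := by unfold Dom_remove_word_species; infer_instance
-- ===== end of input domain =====

-- B replaces A's split-into-words / accumulate-each-word-plus-space loop / strip pipeline by a
-- single first-delimiter partition (suffix after the first space), stripped of spaces.

-- ===== PORT A =====
def remove_word_species (word : String) : String :=
  if word ≠ "unclassified" then
    -- alist = word.split(" ")[1:]
    let alist : List (List Char) :=
      PySem.List.slice (PySem.Chars.splitOn word.toList [' ']) (some 1) none
    -- new_word = ""; for item in alist: new_word += item + " "
    let new_word : List Char :=
      alist.foldl (fun new_word item => new_word ++ item ++ [' ']) []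
    -- word = new_word.strip(" ")
    String.mk (PySem.Chars.stripChars new_word [' '])
  else word

-- ===== PORT B =====
-- word.partition(" ")[2]: the suffix after the FIRST ' ' ([] if there is no ' ') — ported by hand, exact.
def pvAfterFirstSpace : List Char → List Char
  | [] => []
  | c :: rest => if c = ' ' then rest else pvAfterFirstSpace rest

def remove_word_species_alt (word : String) : String :=
  if word ≠ "unclassified" then
    -- word = word.partition(" ")[2].strip(" ")
    String.mk (PySem.Chars.stripChars (pvAfterFirstSpace word.toList) [' '])
  else word

-- ===== PRECONDITION & SPEC =====
def Spec_remove_word_species (word : String) (out : String) : Prop := out = remove_word_species_alt word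
instance (word : String) (out : String) : Decidable (Spec_remove_word_species word out) := by unfold Spec_remove_word_species; infer_instance

-- ===== CLAIM (what is proved, stated in full; the proofs are below) =====
def Claim_equal_remove_word_species : Prop := ∀ (word : String), Dom_remove_word_species word → Spec_remove_word_species word (remove_word_species word)

-- ===== LEMMAS AND PROOFS =====

-- reference form of Python's s.split(" ") on char lists (keeps empty pieces)
def pvSplitSp : List Char → List (List Char)
  | [] => [[]]
  | c :: rest =>
    if c = ' ' then [] :: pvSplitSp rest
    else
      match pvSplitSp rest with
      | [] => [[c]]
      | h :: t => (c :: h) :: t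

theorem pvSplitSp_ne_nil (l : List Char) : pvSplitSp l ≠ [] := by
  cases l with
  | nil => simp [pvSplitSp]
  | cons c rest =>
    simp only [pvSplitSp]
    split <;> try simp
    split <;> simp

theorem pv_go_spec : ∀ (n : Nat) (l cur : List Char) (accs : List (List Char)),
    l.length < n →
    PySem.Chars.splitOn.go [' '] n l cur accs =
      accs.reverse ++
        (match pvSplitSp l with
         | [] => [cur.reverse]
         | h :: t => (cur.reverse ++ h) :: t) := by
  intro n
  induction n with
  | zero => intro l cur accs h; omega
  | succ n ih =>
    intro l cur accs h
    cases l with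
    | nil => simp [PySem.Chars.splitOn.go, pvSplitSp]
    | cons c rest =>
      simp only [PySem.Chars.splitOn.go]
      by_cases hc : c = ' '
      · subst hc
        have hpre : List.isPrefixOf [' '] (' ' :: rest) = true := by simp [List.isPrefixOf]
        rw [if_pos hpre]
        simp only [List.length, List.drop]
        rw [ih rest [] (cur.reverse :: accs) (by simp at h ⊢; omega)]
        simp [pvSplitSp]
        cases hs : pvSplitSp rest with
        | nil => exact absurd hs (pvSplitSp_ne_nil rest)
        | cons h t => simp
      · have hpre : List.isPrefixOf [' '] (c :: rest) = false := by
          simp [List.isPrefixOf]; intro hh; exact absurd hh.symm hc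
        rw [if_neg (by simp [hpre])]
        rw [ih rest (c :: cur) accs (by simp at h ⊢; omega)]
        simp only [pvSplitSp, if_neg hc]
        cases hs : pvSplitSp rest with
        | nil => exact absurd hs (pvSplitSp_ne_nil rest)
        | cons h t => simp

theorem pv_splitOn_eq (cs : List Char) : PySem.Chars.splitOn cs [' '] = pvSplitSp cs := by
  unfold PySem.Chars.splitOn
  rw [pv_go_spec (cs.length + 1) cs [] [] (by omega)]
  cases hs : pvSplitSp cs with
  | nil => exact absurd hs (pvSplitSp_ne_nil cs)
  | cons h t => simp

theorem pv_flatten_splitSp (cs : List Char) :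
    ((pvSplitSp cs).map (· ++ [' '])).flatten = cs ++ [' '] := by
  induction cs with
  | nil => simp [pvSplitSp]
  | cons c rest ih =>
    by_cases hc : c = ' '
    · subst hc; simp [pvSplitSp, ih]
    · simp only [pvSplitSp, if_neg hc]
      cases hs : pvSplitSp rest with
      | nil => exact absurd hs (pvSplitSp_ne_nil rest)
      | cons h t =>
        rw [hs] at ih
        simp at ih ⊢
        simp [ih]

theorem pv_tail_flatten (cs : List Char) :
    (((pvSplitSp cs).drop 1).map (· ++ [' '])).flatten =
      if ' ' ∈ cs then pvAfterFirstSpace cs ++ [' '] else [] := by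
  induction cs with
  | nil => simp [pvSplitSp, pvAfterFirstSpace]
  | cons c rest ih =>
    by_cases hc : c = ' '
    · subst hc
      simp [pvSplitSp, pvAfterFirstSpace, pv_flatten_splitSp]
    · simp only [pvSplitSp, if_neg hc]
      cases hs : pvSplitSp rest with
      | nil => exact absurd hs (pvSplitSp_ne_nil rest)
      | cons h t =>
        rw [hs] at ih
        simp only [List.drop_succ_cons, List.drop_zero] at ih ⊢
        rw [ih]
        have hne : ¬ (' ' = c) := fun h' => hc h'.symm
        simp [pvAfterFirstSpace, hc, hne]

theorem pv_strip_append_space (xs : List Char) :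
    PySem.Chars.stripChars (xs ++ [' ']) [' '] = PySem.Chars.stripChars xs [' '] := by
  simp only [PySem.Chars.stripChars]
  rw [List.dropWhile_append]
  cases hd : List.dropWhile (fun c => List.contains [' '] c) xs with
  | nil =>
    simp [List.dropWhile]
  | cons y ys =>
    simp only [List.isEmpty_cons, Bool.false_eq_true, if_false]
    rw [List.reverse_append]
    simp

theorem pv_afterSpace_of_not_mem (cs : List Char) (h : ' ' ∉ cs) : pvAfterFirstSpace cs = [] := by
  induction cs with
  | nil => rfl
  | cons c rest ih =>
    simp only [List.mem_cons, not_or] at h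
    have : c ≠ ' ' := fun e => h.1 e.symm
    simp [pvAfterFirstSpace, this, ih h.2]

theorem pv_foldl_flatten (ps : List (List Char)) (a : List Char) :
    ps.foldl (fun x p => x ++ p ++ [' ']) a = a ++ (ps.map (· ++ [' '])).flatten := by
  induction ps generalizing a with
  | nil => simp
  | cons p ps ih => simp [List.foldl, ih]

theorem pv_core (cs : List Char) :
    PySem.Chars.stripChars
      ((PySem.List.slice (PySem.Chars.splitOn cs [' ']) (some 1) none).foldl
        (fun x p => x ++ p ++ [' ']) []) [' ']
      = PySem.Chars.stripChars (pvAfterFirstSpace cs) [' '] := by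
  rw [pv_splitOn_eq]
  rw [show ((some 1 : Option Int)) = some ((1 : Nat) : Int) from rfl, PySem.List.slice_from]
  · rw [pv_foldl_flatten, List.nil_append,
        show ((1:Nat):Int).toNat = 1 from rfl, pv_tail_flatten]
    by_cases hm : ' ' ∈ cs
    · rw [if_pos hm, pv_strip_append_space]
    · rw [if_neg hm, pv_afterSpace_of_not_mem _ hm]
  · simp

-- ===== VERDICT (by name: the statement is the Claim_ definition above) =====
theorem remove_word_species_spec : Claim_equal_remove_word_species := by
  intro word _
  unfold Spec_remove_word_species remove_word_species remove_word_species_alt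
  split
  · exact congrArg String.mk (pv_core word.toList)
  · rfl
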